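-- pv_equiv track=rewrite | github.com/JeeNi/Algorithms_Study | gringrape/kakao 공채 준비/공채문제/문제2.py | findFirstBalacedIndex
-- ===== SOURCE A (Python) =====
-- def findFirstBalacedIndex(p):
--     for i in range(1, len(p), 2):
--         balance = 0
--         for char in p[0:i + 1]:
--             if char == '(':
--                 balance += 1
--             else:
--                 balance -= 1
--         if balance == 0:
--             return i
--     return 0
-- ===== SOURCE B (Python) =====
-- def findFirstBalacedIndex(p):
--     balance = 0
--     for i, char in enumerate(p):
--         balance += 1 if char == '(' else -1
--         if i % 2 == 1 and balance == 0:
--             return i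
--     return 0
-- ===== Notes on version B (the rewrite author's own statement) =====
-- stated objective: faster
-- what changed: Replaced the quadratic rescan of every prefix with a single pass that maintains a running balance counter and returns at the first odd index where it hits zero.
import Mathlib
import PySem

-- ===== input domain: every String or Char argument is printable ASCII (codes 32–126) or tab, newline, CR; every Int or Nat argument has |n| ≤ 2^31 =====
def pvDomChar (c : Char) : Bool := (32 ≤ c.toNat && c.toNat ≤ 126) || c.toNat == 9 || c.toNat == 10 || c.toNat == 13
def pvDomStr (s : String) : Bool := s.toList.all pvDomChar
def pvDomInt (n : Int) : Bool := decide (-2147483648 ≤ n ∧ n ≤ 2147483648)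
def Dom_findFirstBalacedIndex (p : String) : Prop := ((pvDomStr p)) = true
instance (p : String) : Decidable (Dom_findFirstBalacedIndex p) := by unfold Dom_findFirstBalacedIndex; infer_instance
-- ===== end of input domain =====

-- B replaces A's quadratic rescan of every prefix with a single left-to-right pass
-- keeping a running balance counter (objective: faster, asymptotically).

-- ===== PORT A =====
-- inner loop: 'balance = 0; for char in chars: …'
def pvAInner (chars : List Char) : Int :=
  chars.foldl (fun balance char => if char = '(' then balance + 1 else balance - 1) 0

-- outer loop 'for i in range(1, len(p), 2): … return i' with early return
def pvALoop (p : List Char) : List Int → Int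
  | [] => 0
  | i :: rest =>
      if pvAInner (PySem.List.slice p (some 0) (some (i + 1))) = 0 then i
      else pvALoop p rest

def findFirstBalacedIndex (p : String) : Int :=
  pvALoop p.toList (PySem.List.pyRange 1 (p.toList.length : Int) 2)

-- ===== PORT B =====
-- 'for i, char in enumerate(p): balance += …; if i % 2 == 1 and balance == 0: return i'
def pvBLoop : List (Int × Char) → Int → Int
  | [], _ => 0
  | (i, char) :: rest, balance =>
      let balance := balance + (if char = '(' then 1 else -1)
      if PySem.Int.mod i 2 = 1 ∧ balance = 0 then i else pvBLoop rest balance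

def findFirstBalacedIndex_alt (p : String) : Int :=
  pvBLoop (PySem.List.enumerate p.toList 0) 0

-- ===== PRECONDITION & SPEC =====
def Spec_findFirstBalacedIndex (p : String) (out : Int) : Prop := out = findFirstBalacedIndex_alt p
instance (p : String) (out : Int) : Decidable (Spec_findFirstBalacedIndex p out) := by unfold Spec_findFirstBalacedIndex; infer_instance

-- ===== CLAIM (what is proved, stated in full; the proofs are below) =====
def Claim_equal_findFirstBalacedIndex : Prop := ∀ (p : String), Dom_findFirstBalacedIndex p → Spec_findFirstBalacedIndex p (findFirstBalacedIndex p)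

-- ===== LEMMAS AND PROOFS =====

lemma pyRange_two_nil (a b : Int) (h : b ≤ a) : PySem.List.pyRange a b 2 = [] := by
  rw [PySem.List.pyRange_of_pos a b (by norm_num)]
  rw [if_neg (by omega : ¬ a < b)]
  simp

lemma pyRange_two_cons (a b : Int) (h : a < b) :
    PySem.List.pyRange a b 2 = a :: PySem.List.pyRange (a + 2) b 2 := by
  rw [PySem.List.pyRange_of_pos a b (by norm_num),
      PySem.List.pyRange_of_pos (a + 2) b (by norm_num)]
  have hN : ((b - a + 2 - 1) / 2).toNat
      = (if a + 2 < b then ((b - (a + 2) + 2 - 1) / 2).toNat else 0) + 1 := by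
    split_ifs with h2 <;> omega
  rw [if_pos h, hN, List.range_succ_eq_map]
  simp only [List.map_cons, List.map_map, Nat.cast_zero, mul_zero, add_zero, List.cons.injEq,
    true_and]
  apply List.map_congr_left
  intro k _
  simp only [Function.comp_apply, Nat.succ_eq_add_one]
  push_cast
  ring

-- the key invariant: the single pass over the remaining characters agrees with
-- A's outer loop over the remaining odd indices, given an even-length prefix already consumed
lemma loop_eq : ∀ (n : Nat) (rest pre : List Char), rest.length ≤ n → pre.length % 2 = 0 →
    pvBLoop (PySem.List.enumerate rest (pre.length : Int)) (pvAInner pre)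
      = pvALoop (pre ++ rest)
          (PySem.List.pyRange ((pre.length : Int) + 1) (((pre ++ rest).length : Nat) : Int) 2) := by
  intro n
  induction n with
  | zero =>
      intro rest pre hlen _
      have : rest = [] := List.eq_nil_of_length_eq_zero (by omega)
      subst this
      simp [PySem.List.enumerate_nil, pvBLoop, pvALoop,
        pyRange_two_nil ((pre.length : Int) + 1) (pre.length : Int) (by omega)]
  | succ n ih =>
      intro rest pre hlen hpar
      have hmod0 : PySem.Int.mod (pre.length : Int) 2 = 0 := by
        rw [show (2 : Int) = ((2 : Nat) : Int) from rfl, PySem.Int.mod_natCast]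
        omega
      match rest with
      | [] =>
          simp [PySem.List.enumerate_nil, pvBLoop, pvALoop,
            pyRange_two_nil ((pre.length : Int) + 1) (pre.length : Int) (by omega)]
      | [c] =>
          rw [PySem.List.enumerate_cons, PySem.List.enumerate_nil]
          simp only [pvBLoop, hmod0]
          rw [if_neg (by simp), pyRange_two_nil ((pre.length : Int) + 1)
            (((pre ++ [c]).length : Nat) : Int) (by simp)]
          simp [pvALoop]
      | c :: d :: rest' =>
          rw [PySem.List.enumerate_cons, PySem.List.enumerate_cons]
          simp only [pvBLoop, hmod0]
          rw [if_neg (by simp)]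
          have hmod1 : PySem.Int.mod ((pre.length : Int) + 1) 2 = 1 := by
            rw [show (pre.length : Int) + 1 = ((pre.length + 1 : Nat) : Int) by push_cast; ring,
              show (2 : Int) = ((2 : Nat) : Int) from rfl, PySem.Int.mod_natCast]
            omega
          -- the two-step balance equals A's rescan of the prefix pre ++ [c, d]
          have hbal : pvAInner (pre ++ [c, d])
              = pvAInner pre + (if c = '(' then 1 else -1) + (if d = '(' then 1 else -1) := by
            simp only [pvAInner, List.foldl_append, List.foldl]
            split_ifs <;> ring
          have hslice : PySem.List.slice (pre ++ c :: d :: rest') (some 0)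
              (some ((pre.length : Int) + 1 + 1)) = pre ++ [c, d] := by
            rw [PySem.List.slice_zero_start, PySem.List.slice_to _ (by omega)]
            have : ((pre.length : Int) + 1 + 1).toNat = pre.length + 2 := by omega
            rw [this]
            rw [show pre ++ c :: d :: rest' = (pre ++ [c, d]) ++ rest' by simp]
            rw [List.take_append_of_le_length (by simp)]
            exact List.take_of_length_le (by simp)
          have hcons : PySem.List.pyRange ((pre.length : Int) + 1)
              (((pre ++ c :: d :: rest').length : Nat) : Int) 2
              = ((pre.length : Int) + 1)
                :: PySem.List.pyRange ((pre.length : Int) + 1 + 2)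
                    (((pre ++ c :: d :: rest').length : Nat) : Int) 2 := by
            apply pyRange_two_cons
            simp
          rw [hcons]
          simp only [pvALoop, hslice, hbal]
          by_cases hz : pvAInner pre + (if c = '(' then 1 else -1) + (if d = '(' then 1 else -1) = 0
          · rw [if_pos hz]; rw [if_pos (And.intro hmod1 hz)]
          · rw [if_neg (by exact fun h => hz h.2), if_neg hz]
            have ihx := ih rest' (pre ++ [c, d]) (by simp at hlen ⊢; omega) (by simp; omega)
            rw [hbal] at ihx
            rw [show pre ++ c :: d :: rest' = (pre ++ [c, d]) ++ rest' by simp]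
            simp only [List.length_append, List.length_cons, List.length_nil] at ihx ⊢
            push_cast at ihx ⊢
            ring_nf at ihx ⊢
            exact ihx

-- ===== VERDICT (by name: the statement is the Claim_ definition above) =====
theorem findFirstBalacedIndex_spec : Claim_equal_findFirstBalacedIndex := by
  intro p _
  unfold Spec_findFirstBalacedIndex findFirstBalacedIndex findFirstBalacedIndex_alt
  have h := loop_eq p.toList.length p.toList [] (le_refl _) (by simp)
  simp only [List.nil_append, List.length_nil, Nat.cast_zero, zero_add] at h
  exact h.symm
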